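-- pv_equiv track=rewrite | github.com/bcgsc/ntJoin | minimizer_assemble.py | find_mx_min_max
-- ===== SOURCE A (Python) =====
-- def find_mx_min_max(list_mx_info, graph):
--     "Given a dictionary in the form assembly->mx->(ctg, pos), find the min/max mx position per ctg"
--     mx_extremes = {} # assembly -> ctg -> (min_pos, max_pos)
--     for assembly in list_mx_info:
--         mx_extremes[assembly] = {}
--         for mx in list_mx_info[assembly]:
--             if mx not in graph:
--                 continue
--             ctg, pos = list_mx_info[assembly][mx]
--             if ctg in mx_extremes[assembly]:
--                 mx_extremes[assembly][ctg] = (min(mx_extremes[assembly][ctg][0], pos),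
--                                               max(mx_extremes[assembly][ctg][1], pos))
--             else:
--                 mx_extremes[assembly][ctg] = (pos, pos)
--     return mx_extremes
-- ===== SOURCE B (Python) =====
-- def find_mx_min_max(list_mx_info, graph):
--     """Collect all positions per contig first, then reduce each list to (min, max)
--     in a separate pass (collect-then-reduce instead of running min/max)."""
--     mx_extremes = {}
--     for assembly in list_mx_info:
--         positions = {}  # ctg -> list of positions of graph minimizers
--         for mx in list_mx_info[assembly]:
--             if mx not in graph:
--                 continue
--             ctg, pos = list_mx_info[assembly][mx]
--             positions.setdefault(ctg, []).append(pos)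
--         mx_extremes[assembly] = {ctg: (min(ps), max(ps)) for ctg, ps in positions.items()}
--     return mx_extremes
-- ===== Notes on version B (the rewrite author's own statement) =====
-- stated objective: alternative
-- what changed: B replaces A's incremental running min/max per contig with a collect-then-reduce decomposition: it first groups all positions of graph minimizers by contig into lists, then in a second pass reduces each list to (min, max).
import Mathlib
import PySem

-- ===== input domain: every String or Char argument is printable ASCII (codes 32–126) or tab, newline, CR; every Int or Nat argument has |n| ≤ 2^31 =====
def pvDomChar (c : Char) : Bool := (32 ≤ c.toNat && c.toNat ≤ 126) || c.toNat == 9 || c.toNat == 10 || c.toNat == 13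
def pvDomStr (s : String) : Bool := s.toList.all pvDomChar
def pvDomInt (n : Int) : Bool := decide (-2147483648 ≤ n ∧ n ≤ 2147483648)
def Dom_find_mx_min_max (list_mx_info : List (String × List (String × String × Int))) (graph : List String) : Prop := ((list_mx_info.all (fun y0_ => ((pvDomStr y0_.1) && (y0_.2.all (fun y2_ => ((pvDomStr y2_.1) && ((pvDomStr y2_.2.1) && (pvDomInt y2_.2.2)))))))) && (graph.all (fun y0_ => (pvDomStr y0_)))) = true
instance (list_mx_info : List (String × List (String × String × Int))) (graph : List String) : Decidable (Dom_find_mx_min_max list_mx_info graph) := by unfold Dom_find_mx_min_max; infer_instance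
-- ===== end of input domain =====

-- B replaces A's incremental running min/max with a collect-then-reduce decomposition
-- (group positions per contig, then reduce each list to (min, max)); objective: alternative.

-- ===== PORT A =====
-- one iteration of A's inner loop body (mx skipped unless in graph; running min/max per ctg)
def pvStepA (graph : List String) (d : PySem.Dict String (Int × Int)) (p : String × String × Int) : PySem.Dict String (Int × Int) :=
  if graph.contains p.1 then
    match d.get? p.2.1 with
    | some mm => d.insert p.2.1 (min mm.1 p.2.2, max mm.2 p.2.2)
    | none => d.insert p.2.1 (p.2.2, p.2.2)
  else d

def find_mx_min_max (list_mx_info : List (String × List (String × String × Int))) (graph : List String) : List (String × List (String × Int × Int)) :=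
  (list_mx_info.foldl
    (fun acc a => acc.insert a.1 (a.2.foldl (pvStepA graph) PySem.Dict.empty))
    PySem.Dict.empty).items.map (fun q => (q.1, q.2.items))

-- ===== PORT B =====
-- min(ps), max(ps) of a non-empty Python list; the [] case is unreachable in B
def pvReduce (ps : List Int) : Int × Int :=
  match ps with
  | [] => (0, 0)
  | q :: rest => (rest.foldl min q, rest.foldl max q)

-- B's inner collection loop: positions.setdefault(ctg, []).append(pos) for graph minimizers
def pvCollect (graph : List String) (mxs : List (String × String × Int)) : PySem.Dict String (List Int) :=
  mxs.foldl (fun d p => if graph.contains p.1 then d.modify p.2.1 [] (· ++ [p.2.2]) else d) PySem.Dict.empty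

def find_mx_min_max_alt (list_mx_info : List (String × List (String × String × Int))) (graph : List String) : List (String × List (String × Int × Int)) :=
  (list_mx_info.foldl
    (fun acc a => acc.insert a.1 ((pvCollect graph a.2).items.map (fun q => (q.1, pvReduce q.2))))
    PySem.Dict.empty).items

-- ===== PRECONDITION & SPEC =====
def Spec_find_mx_min_max (list_mx_info : List (String × List (String × String × Int))) (graph : List String) (out : List (String × List (String × Int × Int))) : Prop := out = find_mx_min_max_alt list_mx_info graph
instance (list_mx_info : List (String × List (String × String × Int))) (graph : List String) (out : List (String × List (String × Int × Int))) : Decidable (Spec_find_mx_min_max list_mx_info graph out) := by unfold Spec_find_mx_min_max; infer_instance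

-- ===== CLAIM (what is proved, stated in full; the proofs are below) =====
def Claim_equal_find_mx_min_max : Prop := ∀ (list_mx_info : List (String × List (String × String × Int))) (graph : List String), Dom_find_mx_min_max list_mx_info graph → Spec_find_mx_min_max list_mx_info graph (find_mx_min_max list_mx_info graph)

-- ===== LEMMAS AND PROOFS =====

-- inserting g v into the value-mapped dict = value-mapping the dict after inserting v
theorem pv_insert_map {α β : Type} (g : α → β) (da : PySem.Dict String α) (db : PySem.Dict String β)
    (h : db.items = da.items.map (fun q => (q.1, g q.2))) (k : String) (v : α) :
    (db.insert k (g v)).items = (da.insert k v).items.map (fun q => (q.1, g q.2)) := by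
  simp only [PySem.Dict.insert, PySem.Dict.contains, h, List.any_map, Function.comp_def]
  by_cases hc : (da.items.any fun p => p.1 == k) = true
  · simp only [hc, if_pos, List.map_map]
    exact List.map_congr_left (fun q _ => by by_cases hq : q.1 = k <;> simp [hq])
  · simp [hc, List.map_append]

-- lookup in the value-mapped dict
theorem pv_get?_map {α β : Type} (g : α → β) (da : PySem.Dict String α) (db : PySem.Dict String β)
    (h : db.items = da.items.map (fun q => (q.1, g q.2))) (k : String) :
    db.get? k = (da.get? k).map g := by
  simp only [PySem.Dict.get?, h, List.find?_map, Function.comp_def, Option.map_map]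

theorem pv_reduce_append (ps : List Int) (hps : ps ≠ []) (pos : Int) :
    pvReduce (ps ++ [pos]) = (min (pvReduce ps).1 pos, max (pvReduce ps).2 pos) := by
  cases ps with
  | nil => exact absurd rfl hps
  | cons q rest => simp [pvReduce, List.foldl_append]

-- invariant of the inner loop: A's dict is the per-value (min,max)-reduction of B's dict of lists
theorem pv_inner (graph : List String) (mxs : List (String × String × Int)) :
    ∀ (db : PySem.Dict String (List Int)) (da : PySem.Dict String (Int × Int)),
      da.items = db.items.map (fun q => (q.1, pvReduce q.2)) →
      (∀ q ∈ db.items, q.2 ≠ []) →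
      (mxs.foldl (pvStepA graph) da).items =
        (mxs.foldl (fun d p => if graph.contains p.1 then d.modify p.2.1 [] (· ++ [p.2.2]) else d) db).items.map
          (fun q => (q.1, pvReduce q.2)) := by
  induction mxs with
  | nil => intro db da h _; simpa using h
  | cons p rest ih =>
    intro db da h hne
    by_cases hg : graph.contains p.1
    · simp only [List.foldl_cons, pvStepA, hg, if_pos]
      have hget : da.get? p.2.1 = (db.get? p.2.1).map pvReduce := pv_get?_map pvReduce db da h p.2.1
      cases hdb : db.get? p.2.1 with
      | none =>
        rw [hget, hdb]
        simp only [Option.map_none]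
        have hmod : db.modify p.2.1 [] (· ++ [p.2.2]) = db.insert p.2.1 [p.2.2] := by
          simp [PySem.Dict.modify, PySem.Dict.getD_of_get?_eq_none _ _ hdb]
        rw [hmod]
        refine ih _ _ ?_ ?_
        · have := pv_insert_map (fun q => pvReduce q) db da h p.2.1 [p.2.2]
          simpa [pvReduce] using this
        · intro q hq
          rcases (PySem.Dict.mem_items_insert _ _ _ _).1 hq with h1 | h2
          · subst h1; simp
          · exact hne q h2.1
      | some ps =>
        have hpsne : ps ≠ [] := hne (p.2.1, ps) (PySem.Dict.mem_items_of_get?_eq_some _ hdb)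
        rw [hget, hdb]
        simp only [Option.map_some]
        have hmod : db.modify p.2.1 [] (· ++ [p.2.2]) = db.insert p.2.1 (ps ++ [p.2.2]) := by
          simp [PySem.Dict.modify, PySem.Dict.getD_of_get?_eq_some _ _ hdb]
        rw [hmod]
        refine ih _ _ ?_ ?_
        · have := pv_insert_map (fun q => pvReduce q) db da h p.2.1 (ps ++ [p.2.2])
          rw [pv_reduce_append ps hpsne p.2.2] at this
          exact this
        · intro q hq
          rcases (PySem.Dict.mem_items_insert _ _ _ _).1 hq with h1 | h2
          · subst h1; simp
          · exact hne q h2.1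
    · simp only [List.foldl_cons, pvStepA, hg, if_neg, Bool.false_eq_true, not_false_iff]
      exact ih db da h hne

-- invariant of the outer loop: B's outer dict is the items-mapped image of A's outer dict
theorem pv_outer (graph : List String) (lst : List (String × List (String × String × Int))) :
    ∀ (da : PySem.Dict String (PySem.Dict String (Int × Int)))
      (db : PySem.Dict String (List (String × Int × Int))),
      db.items = da.items.map (fun q => (q.1, q.2.items)) →
      (lst.foldl (fun acc a => acc.insert a.1 ((pvCollect graph a.2).items.map (fun q => (q.1, pvReduce q.2)))) db).items =
        (lst.foldl (fun acc a => acc.insert a.1 (a.2.foldl (pvStepA graph) PySem.Dict.empty)) da).items.map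
          (fun q => (q.1, q.2.items)) := by
  induction lst with
  | nil => intro da db h; simpa using h
  | cons a rest ih =>
    intro da db h
    simp only [List.foldl_cons]
    refine ih _ _ ?_
    have hval : ((pvCollect graph a.2).items.map fun q => (q.1, pvReduce q.2)) =
        (a.2.foldl (pvStepA graph) PySem.Dict.empty).items := by
      exact (pv_inner graph a.2 PySem.Dict.empty PySem.Dict.empty (by rfl) (by intro q hq; simp [PySem.Dict.empty] at hq)).symm
    rw [hval]
    exact pv_insert_map (fun dd => dd.items) da db h a.1 (a.2.foldl (pvStepA graph) PySem.Dict.empty)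

-- ===== VERDICT (by name: the statement is the Claim_ definition above) =====
theorem find_mx_min_max_spec : Claim_equal_find_mx_min_max := by
  intro lst graph _
  unfold Spec_find_mx_min_max find_mx_min_max find_mx_min_max_alt
  exact (pv_outer graph lst PySem.Dict.empty PySem.Dict.empty (by rfl)).symm
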